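-- pv_equiv track=rewrite | github.com/aekh/AWAIRE | Voting-24/irvballot.py | equiv_decode
-- ===== SOURCE A (Python) =====
-- def equiv_decode(code, ncand):
--     """ returns the ballot corresponding to the given code and ncand """
--     assert code > 0  # only positive codes
--     # assert 0 <= code < 2**(ncand-1)  # assert code is bounded within allowed limits
--     binary = [*'{0:b}'.format(code)]
--     ballot = []
--     # ballot = [ncand-1]
--     for idx, elem in enumerate(reversed(binary)):
--         if int(elem):
--             ballot.insert(len(ballot), idx)
--     return ballot
-- ===== SOURCE B (Python) =====
-- def equiv_decode(code, ncand):
--     """ returns the ballot corresponding to the given code and ncand """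
--     assert code > 0  # only positive codes
--     ballot = []
--     idx = 0
--     while code:
--         if code & 1:
--             ballot.append(idx)
--         idx += 1
--         code >>= 1
--     return ballot
-- ===== Notes on version B (the rewrite author's own statement) =====
-- stated objective: idiomatic
-- what changed: B extracts set-bit indices directly from the integer with & 1 and >>= shifts instead of formatting the number as a binary string, reversing it and re-parsing each character with int().
import Mathlib
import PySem

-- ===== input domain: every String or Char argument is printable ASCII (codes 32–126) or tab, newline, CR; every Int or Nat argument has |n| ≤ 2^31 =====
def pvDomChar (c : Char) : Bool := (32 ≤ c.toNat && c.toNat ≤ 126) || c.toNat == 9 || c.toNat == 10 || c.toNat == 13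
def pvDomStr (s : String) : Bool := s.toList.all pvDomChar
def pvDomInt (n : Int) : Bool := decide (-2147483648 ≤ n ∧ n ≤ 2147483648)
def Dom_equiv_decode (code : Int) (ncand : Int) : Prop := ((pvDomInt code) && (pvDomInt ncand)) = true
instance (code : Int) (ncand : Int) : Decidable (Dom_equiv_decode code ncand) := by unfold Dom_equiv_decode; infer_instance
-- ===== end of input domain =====

-- ===== PORT A =====
-- B replaces A's binary-string formatting with direct bit arithmetic (same values, same order).
-- Pre_ excludes code <= 0, where the Python `assert code > 0` raises AssertionError.

-- '{0:b}'.format(code): binary digits of code, most significant first (exact for code >= 1)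
def pvDigit (n : Nat) : Char := if n = 1 then '1' else '0'

def pvBinFmt (n : Nat) : List Char :=
  if n < 2 then [pvDigit n]
  else pvBinFmt (n / 2) ++ [pvDigit (n % 2)]
decreasing_by exact Nat.div_lt_self (by omega) (by decide)

-- int(elem) on a binary-digit character (exact: elem is '0' or '1')
def pvIntOf (c : Char) : Int := if c = '1' then 1 else 0

def equiv_decode (code : Int) (ncand : Int) : List Int :=
  let binary := pvBinFmt code.toNat
  (PySem.List.enumerate binary.reverse).foldl
    (fun ballot p => if pvIntOf p.2 ≠ 0 then ballot ++ [p.1] else ballot) []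

-- ===== PORT B =====
-- while code: if code & 1: ballot.append(idx); idx += 1; code >>= 1
def pvAltLoop (n : Nat) (ballot : List Int) (idx : Int) : List Int :=
  if n = 0 then ballot
  else pvAltLoop (n / 2) (if n % 2 = 1 then ballot ++ [idx] else ballot) (idx + 1)
decreasing_by exact Nat.div_lt_self (by omega) (by decide)

def equiv_decode_alt (code : Int) (ncand : Int) : List Int :=
  pvAltLoop code.toNat [] 0

-- ===== PRECONDITION & SPEC =====
-- the Python A (and B) asserts code > 0 and raises AssertionError otherwise
def Pre_equiv_decode (code : Int) (ncand : Int) : Prop := 0 < code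
instance (code : Int) (ncand : Int) : Decidable (Pre_equiv_decode code ncand) := by unfold Pre_equiv_decode; infer_instance
def pvWitness_equiv_decode : Int × Int := (13, 4)

def Spec_equiv_decode (code : Int) (ncand : Int) (out : List Int) : Prop := out = equiv_decode_alt code ncand
instance (code : Int) (ncand : Int) (out : List Int) : Decidable (Spec_equiv_decode code ncand out) := by unfold Spec_equiv_decode; infer_instance

-- ===== CLAIM (what is proved, stated in full; the proofs are below) =====
def Claim_equal_equiv_decode : Prop := ∀ (code : Int) (ncand : Int), Dom_equiv_decode code ncand → Pre_equiv_decode code ncand → Spec_equiv_decode code ncand (equiv_decode code ncand)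

-- ===== LEMMAS AND PROOFS =====

-- reference list of set-bit indices, LSB first, starting at idx
def pvBits (n : Nat) (idx : Int) : List Int :=
  if n = 0 then []
  else (if n % 2 = 1 then [idx] else []) ++ pvBits (n / 2) (idx + 1)
decreasing_by exact Nat.div_lt_self (by omega) (by decide)

theorem pvAltLoop_eq (n : Nat) : ∀ (acc : List Int) (idx : Int),
    pvAltLoop n acc idx = acc ++ pvBits n idx := by
  induction n using Nat.strong_induction_on with
  | _ n ih =>
    intro acc idx
    rw [pvAltLoop, pvBits]
    by_cases h0 : n = 0
    · simp [h0]
    · rw [if_neg h0, if_neg h0, ih (n / 2) (Nat.div_lt_self (by omega) (by decide))]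
      by_cases h1 : n % 2 = 1 <;> simp [h1]

-- collecting pass of A's enumerate-fold, with an index counter
def pvCollect : List Char → Int → List Int
  | [], _ => []
  | c :: cs, i => (if pvIntOf c ≠ 0 then [i] else []) ++ pvCollect cs (i + 1)

theorem pvFold_eq_collect (cs : List Char) (s : Int) (acc : List Int) :
    (PySem.List.enumerate cs s).foldl
      (fun ballot p => if pvIntOf p.2 ≠ 0 then ballot ++ [p.1] else ballot) acc
    = acc ++ pvCollect cs s := by
  induction cs generalizing s acc with
  | nil => simp [PySem.List.enumerate_nil, pvCollect]
  | cons c cs ih =>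
    rw [PySem.List.enumerate_cons, List.foldl_cons, ih, pvCollect]
    split_ifs <;> simp

theorem pvBinFmt_reverse_collect (n : Nat) : ∀ (i : Int),
    pvCollect (pvBinFmt n).reverse i = pvBits n i := by
  induction n using Nat.strong_induction_on with
  | _ n ih =>
    intro i
    rw [pvBinFmt]
    by_cases h : n < 2
    · rw [if_pos h]
      interval_cases n <;> simp [pvDigit, pvCollect, pvIntOf, pvBits]
    · rw [if_neg h, List.reverse_append, List.reverse_singleton, List.singleton_append,
        pvCollect, ih (n / 2) (Nat.div_lt_self (by omega) (by decide))]
      conv_rhs => rw [pvBits, if_neg (by omega : ¬ n = 0)]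
      rcases Nat.mod_two_eq_zero_or_one n with h2 | h2 <;>
        simp [h2, pvDigit, pvIntOf]

theorem equiv_decode_eq_bits (code ncand : Int) :
    equiv_decode code ncand = pvBits code.toNat 0 := by
  unfold equiv_decode
  rw [pvFold_eq_collect, pvBinFmt_reverse_collect]
  simp

-- ===== VERDICT (by name: the statement is the Claim_ definition above) =====
theorem equiv_decode_spec : Claim_equal_equiv_decode := by
  intro code ncand _ _
  unfold Spec_equiv_decode equiv_decode_alt
  rw [pvAltLoop_eq, equiv_decode_eq_bits]
  simp
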